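-- pv_equiv track=rewrite | github.com/anandaworldwide/ananda-library-chatbot | evaluation/process_word_docs.py | find_query_in_results
-- ===== SOURCE A (Python) =====
-- from typing import Any
--
-- def find_query_in_results(query_text: str, results: dict[str, Any]) -> str | None:
--     """Find the query ID in retrieval results that matches the query text."""
--     queries_list = results["results"]
--
--     # Search for exact match
--     for query_data in queries_list:
--         stored_query = query_data.get("query_text", "").strip()
--         if stored_query == query_text.strip():
--             return query_data.get("query_id", "unknown")
--
--     # If exact match fails, try partial matching
--     for query_data in queries_list:
--         stored_query = query_data.get("query_text", "").strip()
--         if stored_query in query_text or query_text in stored_query: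
--             return query_data.get("query_id", "unknown")
--
--     return None
-- ===== SOURCE B (Python) =====
-- def find_query_in_results(query_text, results):
--     """Find the query ID in retrieval results that matches the query text.
--
--     Single pass: return on the first exact match; otherwise remember the
--     first partial match as a fallback candidate.
--     """
--     candidate = None
--     for query_data in results["results"]:
--         stored_query = query_data.get("query_text", "").strip()
--         if stored_query == query_text.strip():
--             return query_data.get("query_id", "unknown")
--         if candidate is None and (stored_query in query_text or query_text in stored_query):
--             candidate = query_data
--     if candidate is not None:
--         return candidate.get("query_id", "unknown")
--     return None
-- ===== Notes on version B (the rewrite author's own statement) =====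
-- stated objective: alternative
-- what changed: Replaces A's two full passes over the result list by a single pass that returns on the first exact match and carries the first partial match as a fallback candidate.
import Mathlib
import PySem

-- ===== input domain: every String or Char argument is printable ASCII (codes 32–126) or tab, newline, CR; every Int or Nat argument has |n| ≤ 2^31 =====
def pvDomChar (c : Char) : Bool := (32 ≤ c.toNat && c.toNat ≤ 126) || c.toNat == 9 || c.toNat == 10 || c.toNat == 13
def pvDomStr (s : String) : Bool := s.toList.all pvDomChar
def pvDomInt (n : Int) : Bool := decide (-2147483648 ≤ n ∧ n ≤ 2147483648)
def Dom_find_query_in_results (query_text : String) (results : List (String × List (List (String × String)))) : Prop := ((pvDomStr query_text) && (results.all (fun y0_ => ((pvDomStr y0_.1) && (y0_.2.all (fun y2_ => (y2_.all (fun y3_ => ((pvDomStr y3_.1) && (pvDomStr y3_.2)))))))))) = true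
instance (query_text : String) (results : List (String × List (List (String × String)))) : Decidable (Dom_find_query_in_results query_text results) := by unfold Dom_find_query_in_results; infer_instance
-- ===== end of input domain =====

-- B replaces A's two full passes by a single pass carrying the first partial match as a fallback candidate (alternative decomposition, same cost).


-- ===== PORT A =====
-- query_data.get(key, dflt)
def pvQGet (qd : List (String × String)) (key dflt : String) : String :=
  (PySem.Dict.mk qd).getD key dflt

-- first loop of A: exact match on stripped texts
def pvFindExact (query_text : String) : List (List (String × String)) → Option String
  | [] => none
  | qd :: rest =>
    if PySem.Str.strip (pvQGet qd "query_text" "") = PySem.Str.strip query_text then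
      some (pvQGet qd "query_id" "unknown")
    else pvFindExact query_text rest

-- second loop of A: partial (substring) match
def pvFindPartial (query_text : String) : List (List (String × String)) → Option String
  | [] => none
  | qd :: rest =>
    let stored := PySem.Str.strip (pvQGet qd "query_text" "")
    if PySem.Str.isIn stored query_text || PySem.Str.isIn query_text stored then
      some (pvQGet qd "query_id" "unknown")
    else pvFindPartial query_text rest

def find_query_in_results (query_text : String) (results : List (String × List (List (String × String)))) : Option String :=
  let queries_list := (PySem.Dict.mk results).getD "results" []   -- KeyError when "results" is absent: excluded by Pre_
  match pvFindExact query_text queries_list with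
  | some r => some r
  | none => pvFindPartial query_text queries_list

-- ===== PORT B =====
-- single pass: return on exact match, remember the first partial match as fallback
def pvScan (query_text : String) (cand : Option (List (String × String))) :
    List (List (String × String)) → Option String
  | [] => cand.map (fun qd => pvQGet qd "query_id" "unknown")
  | qd :: rest =>
    let stored := PySem.Str.strip (pvQGet qd "query_text" "")
    if stored = PySem.Str.strip query_text then
      some (pvQGet qd "query_id" "unknown")
    else
      pvScan query_text
        (if cand.isNone && (PySem.Str.isIn stored query_text || PySem.Str.isIn query_text stored)
         then some qd else cand) rest

def find_query_in_results_alt (query_text : String) (results : List (String × List (List (String × String)))) : Option String :=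
  pvScan query_text none ((PySem.Dict.mk results).getD "results" [])

-- ===== PRECONDITION & SPEC =====
-- Pre_ excludes only the inputs on which A raises KeyError: no "results" key.
def Pre_find_query_in_results (query_text : String) (results : List (String × List (List (String × String)))) : Prop :=
  "results" ∈ results.map Prod.fst
instance (query_text : String) (results : List (String × List (List (String × String)))) : Decidable (Pre_find_query_in_results query_text results) := by unfold Pre_find_query_in_results; infer_instance

def pvWitness_find_query_in_results : String × (List (String × List (List (String × String)))) :=
  ("hello", [("results", [[("query_text", "hello"), ("query_id", "q1")]])])

def Spec_find_query_in_results (query_text : String) (results : List (String × List (List (String × String)))) (out : Option String) : Prop := out = find_query_in_results_alt query_text results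
instance (query_text : String) (results : List (String × List (List (String × String)))) (out : Option String) : Decidable (Spec_find_query_in_results query_text results out) := by unfold Spec_find_query_in_results; infer_instance

-- ===== CLAIM (what is proved, stated in full; the proofs are below) =====
def Claim_equal_find_query_in_results : Prop := ∀ (query_text : String) (results : List (String × List (List (String × String)))), Dom_find_query_in_results query_text results → Pre_find_query_in_results query_text results → Spec_find_query_in_results query_text results (find_query_in_results query_text results)

-- ===== LEMMAS AND PROOFS =====

-- Loop invariant for B's single pass: with fallback candidate `cand`, the scan
-- equals "exact match first, else the recorded candidate, else a partial match".
theorem pvScan_eq (query_text : String) :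
    ∀ (l : List (List (String × String))) (cand : Option (List (String × String))),
      pvScan query_text cand l =
        match pvFindExact query_text l with
        | some r => some r
        | none =>
          match cand with
          | some qd => some (pvQGet qd "query_id" "unknown")
          | none => pvFindPartial query_text l := by
  intro l
  induction l with
  | nil => intro cand; cases cand <;> simp [pvScan, pvFindExact, pvFindPartial]
  | cons qd rest ih =>
    intro cand
    simp only [pvScan, pvFindExact, pvFindPartial]
    by_cases hex : PySem.Str.strip (pvQGet qd "query_text" "") = PySem.Str.strip query_text
    · simp [hex]
    · simp only [hex, if_false]
      rw [ih]
      cases cand with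
      | some c => simp
      | none =>
        cases hE : pvFindExact query_text rest <;> simp only [hE] <;> split_ifs <;> simp_all

-- ===== VERDICT (by name: the statement is the Claim_ definition above) =====
theorem find_query_in_results_spec : Claim_equal_find_query_in_results := by
  intro query_text results _ _
  unfold Spec_find_query_in_results find_query_in_results find_query_in_results_alt
  rw [pvScan_eq]
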